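-- pv_equiv track=rewrite | github.com/KittyKittyKitKat/FreeForm-Minesweeper | dialogues.py | decompress_board
-- ===== SOURCE A (Python) =====
-- def decompress_board(rle_compressed_board: str):
--     """Decompress a running length encoded board back into a list of bit strings.
--
--     Args:
--         rle_compressed_board: Run length encoded board.
--
--     Returns:
--         A list of binary strings representing a game board.
--     """
--     decompressed_board = ''
--     current_num = ''
--     for char in rle_compressed_board:
--         if char.isalpha():
--             decompressed_board += char * int(current_num)
--             current_num = ''
--         else:
--             current_num += char
--     decompressed_board_l = (
--         decompressed_board.replace('E', '1').replace('D', '0').split('N')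
--     )
--     return decompressed_board_l
-- ===== SOURCE B (Python) =====
-- def decompress_board(rle_compressed_board: str):
--     """Decompress a run-length encoded board back into a list of bit strings.
--
--     Instead of accumulating digit characters one by one, repeatedly find the
--     next letter, decode the whole number-letter group in one step, and consume
--     the rest of the string recursively via slicing.
--     """
--     pieces = []
--     rest = rle_compressed_board
--     while rest:
--         i = 0
--         while i < len(rest) and not rest[i].isalpha():
--             i += 1
--         if i == len(rest):
--             break  # trailing digits with no letter contribute nothing
--         pieces.append(rest[i] * int(rest[:i]))
--         rest = rest[i + 1:]
--     return ''.join(pieces).replace('E', '1').replace('D', '0').split('N')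
-- ===== Notes on version B (the rewrite author's own statement) =====
-- stated objective: alternative
-- what changed: A single character-by-character fold carrying a digit accumulator is replaced by a group-at-a-time loop: find the next letter, decode the whole number-letter group from slices, and continue on the remaining suffix; pieces are collected and joined at the end.
import Mathlib
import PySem

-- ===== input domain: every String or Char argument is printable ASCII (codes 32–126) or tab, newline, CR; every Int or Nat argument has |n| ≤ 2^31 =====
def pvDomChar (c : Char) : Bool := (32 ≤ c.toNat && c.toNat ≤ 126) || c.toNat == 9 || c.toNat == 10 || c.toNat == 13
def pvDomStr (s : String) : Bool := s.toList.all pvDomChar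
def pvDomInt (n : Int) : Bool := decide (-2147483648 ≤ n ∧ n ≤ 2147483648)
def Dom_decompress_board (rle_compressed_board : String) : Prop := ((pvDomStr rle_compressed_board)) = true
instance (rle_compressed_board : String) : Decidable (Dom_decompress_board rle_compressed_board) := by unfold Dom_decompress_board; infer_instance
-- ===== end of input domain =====

-- B replaces A's character-by-character fold (digit accumulator) by a group-at-a-time
-- recursion that decodes each number-letter group from slices; same cost, alternative structure.

-- ===== PORT A =====
-- A's loop body: on a letter, emit char * int(current_num) and reset; else extend current_num.
-- int(current_num) raising ValueError is encoded as `(PySem.Int.ofChars? _).getD 0`;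
-- exactly those inputs are excluded by Pre_decompress_board below.
def pvStepA (st : List Char × List Char) (c : Char) : List Char × List Char :=
  if PySem.Chars.isalpha c then
    (st.1 ++ List.replicate ((PySem.Int.ofChars? st.2).getD 0).toNat c, ([] : List Char))
  else
    (st.1, st.2 ++ [c])

def decompress_board (rle_compressed_board : String) : List String :=
  let st := rle_compressed_board.toList.foldl pvStepA (([] : List Char), ([] : List Char))
  (PySem.Str.split? (PySem.Str.replace (PySem.Str.replace (String.mk st.1) "E" "1") "D" "0") "N").getD []

-- ===== PORT B =====
-- B's loop: scan for the first letter (index i = length of the non-alpha prefix),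
-- emit rest[i] * int(rest[:i]) and continue on rest[i+1:]; trailing digits are dropped.
def pvAltGo (cs : List Char) : List Char :=
  if hr : cs.dropWhile (fun c => !PySem.Chars.isalpha c) = [] then []
  else
    List.replicate
        ((PySem.Int.ofChars? (cs.takeWhile (fun c => !PySem.Chars.isalpha c))).getD 0).toNat
        ((cs.dropWhile (fun c => !PySem.Chars.isalpha c)).head hr)
      ++ pvAltGo (cs.dropWhile (fun c => !PySem.Chars.isalpha c)).tail
termination_by cs.length
decreasing_by
  have hle : (cs.dropWhile (fun c => !PySem.Chars.isalpha c)).length ≤ cs.length :=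
    (List.dropWhile_suffix _).length_le
  have hpos : 0 < (cs.dropWhile (fun c => !PySem.Chars.isalpha c)).length :=
    List.length_pos_of_ne_nil hr
  rw [List.length_tail]
  omega

def decompress_board_alt (rle_compressed_board : String) : List String :=
  (PySem.Str.split? (PySem.Str.replace (PySem.Str.replace (String.mk (pvAltGo rle_compressed_board.toList)) "E" "1") "D" "0") "N").getD []

-- ===== PRECONDITION & SPEC =====
-- Pre_ excludes exactly the inputs on which Python A raises ValueError: a letter whose
-- preceding maximal run of non-letter characters does not parse as an int (an empty or malformed digit run).
def Pre_decompress_board (rle_compressed_board : String) : Prop :=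
  ∀ i, (h : i < rle_compressed_board.toList.length) →
    PySem.Chars.isalpha (rle_compressed_board.toList[i]'h) = true →
    PySem.Int.ofChars?
      (((rle_compressed_board.toList.take i).reverse.takeWhile
          (fun c => !PySem.Chars.isalpha c)).reverse) ≠ none
instance (rle_compressed_board : String) : Decidable (Pre_decompress_board rle_compressed_board) := by
  unfold Pre_decompress_board; infer_instance

def pvWitness_decompress_board : String := "2E1N1D"

def Spec_decompress_board (rle_compressed_board : String) (out : List String) : Prop := out = decompress_board_alt rle_compressed_board
instance (rle_compressed_board : String) (out : List String) : Decidable (Spec_decompress_board rle_compressed_board out) := by unfold Spec_decompress_board; infer_instance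

-- ===== CLAIM (what is proved, stated in full; the proofs are below) =====
def Claim_equal_decompress_board : Prop := ∀ (rle_compressed_board : String), Dom_decompress_board rle_compressed_board → Pre_decompress_board rle_compressed_board → Spec_decompress_board rle_compressed_board (decompress_board rle_compressed_board)

-- ===== LEMMAS AND PROOFS =====

-- The head of a non-empty dropWhile result falsifies the predicate.
theorem pv_dropWhile_head_false {p : Char → Bool} {l : List Char} {c : Char} {rest : List Char}
    (h : l.dropWhile p = c :: rest) : p c = false := by
  induction l with
  | nil => simp at h
  | cons a l ih =>
      rw [List.dropWhile_cons] at h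
      by_cases hp : p a = true
      · exact ih (by simpa [hp] using h)
      · simp only [hp] at h
        simp only [Bool.not_eq_true] at hp
        cases h
        exact hp

theorem pvAltGo_nil_case {cs : List Char}
    (h : cs.dropWhile (fun c => !PySem.Chars.isalpha c) = []) : pvAltGo cs = [] := by
  rw [pvAltGo.eq_def]; simp only [h]; simp

theorem pvAltGo_cons_case {cs : List Char} {c : Char} {rest : List Char}
    (h : cs.dropWhile (fun c => !PySem.Chars.isalpha c) = c :: rest) :
    pvAltGo cs =
      List.replicate
          ((PySem.Int.ofChars? (cs.takeWhile (fun c => !PySem.Chars.isalpha c))).getD 0).toNat c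
        ++ pvAltGo rest := by
  rw [pvAltGo.eq_def]; simp only [h]; simp

-- Folding A's step over a run of non-letter characters just extends current_num.
theorem pv_foldl_nonalpha (num : List Char)
    (h : ∀ c ∈ num, PySem.Chars.isalpha c = false) :
    ∀ acc cur, List.foldl pvStepA (acc, cur) num = (acc, cur ++ num) := by
  induction num with
  | nil => intro acc cur; simp
  | cons c cs ih =>
      intro acc cur
      have hc : PySem.Chars.isalpha c = false := h c (by simp)
      simp only [List.foldl_cons, pvStepA, hc]
      simp only [Bool.false_eq_true, if_false]
      rw [ih (fun d hd => h d (by simp [hd])) acc (cur ++ [c])]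
      simp

-- Core invariant: A's fold started with an empty current_num produces exactly
-- acc ++ the group-at-a-time decoding of the remaining characters.
theorem pv_main (cs : List Char) (acc : List Char) :
    (List.foldl pvStepA (acc, ([] : List Char)) cs).1 = acc ++ pvAltGo cs := by
  have hsplit := List.takeWhile_append_dropWhile
    (p := fun c => !PySem.Chars.isalpha c) (l := cs)
  have hnum : ∀ c ∈ cs.takeWhile (fun c => !PySem.Chars.isalpha c),
      PySem.Chars.isalpha c = false := by
    intro c hc
    simpa using List.mem_takeWhile_imp hc
  rcases hdrop : cs.dropWhile (fun c => !PySem.Chars.isalpha c) with _ | ⟨c, rest⟩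
  · -- no letter left: A keeps accumulating digits, the output is unchanged; B stops
    rw [pvAltGo_nil_case hdrop]
    have hcs : cs = cs.takeWhile (fun c => !PySem.Chars.isalpha c) := by
      conv_lhs => rw [← hsplit]
      rw [hdrop]; simp
    rw [hcs, pv_foldl_nonalpha _ hnum]
    simp
  · -- a letter c after the non-letter run: one decoded group, then recurse
    have hc : PySem.Chars.isalpha c = true := by
      have := pv_dropWhile_head_false hdrop
      simpa using this
    conv_lhs => rw [← hsplit, hdrop]
    rw [List.foldl_append, pv_foldl_nonalpha _ hnum]
    simp only [List.foldl_cons, pvStepA, hc, if_true, List.nil_append]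
    have hlen : rest.length < cs.length := by
      have hle : (cs.dropWhile (fun c => !PySem.Chars.isalpha c)).length ≤ cs.length :=
        (List.dropWhile_suffix _).length_le
      rw [hdrop] at hle; simp at hle; omega
    rw [pv_main rest _]
    rw [pvAltGo_cons_case hdrop]
    simp
termination_by cs.length

-- ===== VERDICT (by name: the statement is the Claim_ definition above) =====
theorem decompress_board_spec : Claim_equal_decompress_board := by
  unfold Claim_equal_decompress_board
  intro s _ _
  unfold Spec_decompress_board
  simp only [decompress_board, decompress_board_alt]
  rw [show (List.foldl pvStepA (([] : List Char), ([] : List Char)) s.toList).1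
        = pvAltGo s.toList by simpa using pv_main s.toList []]
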